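-- pv_equiv track=rewrite | github.com/douzujun/Python-Foundation-Suda | 苏大上机代码/python_project/03_历年真题期末期中/RealExercise/py10_2012.py | minSquare
-- ===== SOURCE A (Python) =====
-- def minSquare(point):
--     px,py=point[0][0],point[0][1]
--     for i in range(len(point)):
--         if px>point[i][0]:
--             px=point[i][0]
--         if py>point[i][1]:
--             py=point[i][1]
--     return px*py
-- ===== SOURCE B (Python) =====
-- def minSquare(point):
--     xs = sorted(p[0] for p in point)
--     ys = sorted(p[1] for p in point)
--     return xs[0] * ys[0]
-- ===== Notes on version B (the rewrite author's own statement) =====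
-- stated objective: alternative
-- what changed: B sorts each coordinate column and takes the first element of each sorted column, instead of A's single index loop maintaining two running minima.
import Mathlib
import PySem

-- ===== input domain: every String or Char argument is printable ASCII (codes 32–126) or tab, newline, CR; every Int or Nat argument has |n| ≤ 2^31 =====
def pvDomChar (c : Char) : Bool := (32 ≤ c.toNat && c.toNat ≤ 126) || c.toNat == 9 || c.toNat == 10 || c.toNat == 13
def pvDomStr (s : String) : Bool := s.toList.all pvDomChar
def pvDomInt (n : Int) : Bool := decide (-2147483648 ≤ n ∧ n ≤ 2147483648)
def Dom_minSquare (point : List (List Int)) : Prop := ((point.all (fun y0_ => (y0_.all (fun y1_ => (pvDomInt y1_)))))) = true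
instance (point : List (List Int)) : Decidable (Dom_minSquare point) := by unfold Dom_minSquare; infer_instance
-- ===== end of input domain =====

-- B sorts each coordinate column and takes the first element of each sorted column (alternative decomposition); A keeps two running minima in one index loop.
-- ===== PORT A =====
-- px,py = point[0][0], point[0][1]; loop over range(len(point)) updating the two running minima; return px*py
def minSquare (point : List (List Int)) : Int :=
  let row0 := (PySem.List.pyGet? point 0).getD []
  let px0 := (PySem.List.pyGet? row0 0).getD 0
  let py0 := (PySem.List.pyGet? row0 1).getD 0
  let s := (PySem.List.pyRange 0 (point.length : Int) 1).foldl
    (fun (s : Int × Int) i =>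
      let row := PySem.List.pyGetD point i []
      let x := PySem.List.pyGetD row 0 0
      let y := PySem.List.pyGetD row 1 0
      (if s.1 > x then x else s.1, if s.2 > y then y else s.2))
    (px0, py0)
  s.1 * s.2

-- ===== PORT B =====
-- xs = sorted(p[0] for p in point); ys = sorted(p[1] for p in point); return xs[0]*ys[0]
def minSquare_alt (point : List (List Int)) : Int :=
  let xs := PySem.List.sorted (point.map (fun r => PySem.List.pyGetD r 0 0)) (fun v => v) false
  let ys := PySem.List.sorted (point.map (fun r => PySem.List.pyGetD r 1 0)) (fun v => v) false
  ((PySem.List.pyGet? xs 0).getD 0) * ((PySem.List.pyGet? ys 0).getD 0)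

-- ===== PRECONDITION & SPEC =====
-- Pre_ excludes exactly the inputs where Python A raises IndexError: the empty list and any row with fewer than 2 coordinates.
def Pre_minSquare (point : List (List Int)) : Prop :=
  point ≠ [] ∧ ∀ r ∈ point, 2 ≤ r.length
instance (point : List (List Int)) : Decidable (Pre_minSquare point) := by unfold Pre_minSquare; infer_instance
def pvWitness_minSquare : List (List Int) := [[3, 5], [1, 7], [4, 2]]
def Spec_minSquare (point : List (List Int)) (out : Int) : Prop := out = minSquare_alt point
instance (point : List (List Int)) (out : Int) : Decidable (Spec_minSquare point out) := by unfold Spec_minSquare; infer_instance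

-- ===== CLAIM (what is proved, stated in full; the proofs are below) =====
def Claim_equal_minSquare : Prop := ∀ (point : List (List Int)), Dom_minSquare point → Pre_minSquare point → Spec_minSquare point (minSquare point)

-- ===== LEMMAS AND PROOFS =====

theorem foldl_pair_min (t : List (List Int)) (a b : Int) :
    t.foldl (fun (s : Int × Int) r =>
      (if s.1 > PySem.List.pyGetD r 0 0 then PySem.List.pyGetD r 0 0 else s.1,
       if s.2 > PySem.List.pyGetD r 1 0 then PySem.List.pyGetD r 1 0 else s.2)) (a, b)
    = (t.foldl (fun m r => min m (PySem.List.pyGetD r 0 0)) a,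
       t.foldl (fun m r => min m (PySem.List.pyGetD r 1 0)) b) := by
  induction t generalizing a b with
  | nil => rfl
  | cons h t ih =>
    simp only [List.foldl_cons]
    rw [ih]
    congr 1 <;> · congr 1; omega

theorem foldl_min_le (t : List Int) (a : Int) :
    t.foldl min a ≤ a ∧ ∀ x ∈ t, t.foldl min a ≤ x := by
  induction t generalizing a with
  | nil => simp
  | cons h t ih =>
    simp only [List.foldl_cons]
    obtain ⟨h1, h2⟩ := ih (min a h)
    exact ⟨le_trans h1 (min_le_left _ _),
      fun x hx => by
        rcases List.mem_cons.1 hx with rfl | hx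
        · exact le_trans h1 (min_le_right _ _)
        · exact h2 x hx⟩

theorem foldl_min_mem (t : List Int) (a : Int) :
    t.foldl min a = a ∨ t.foldl min a ∈ t := by
  induction t generalizing a with
  | nil => simp
  | cons h t ih =>
    simp only [List.foldl_cons]
    rcases ih (min a h) with heq | hmem
    · rw [heq]
      rcases le_total a h with hle | hle
      · exact Or.inl (min_eq_left hle)
      · exact Or.inr (by simp [min_eq_right hle])
    · exact Or.inr (List.mem_cons_of_mem _ hmem)

theorem min_foldl_map (f : List Int → Int) (t : List (List Int)) (a : Int) :
    (t.map f).foldl min a = t.foldl (fun m r => min m (f r)) a := by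
  induction t generalizing a with
  | nil => rfl
  | cons h t ih => simp [List.foldl_cons, ih]

-- head of the sorted (ascending, identity key) nonempty list is the left fold of min
theorem head_sorted_eq_foldl_min (h : Int) (t : List Int) :
    (PySem.List.pyGet? (PySem.List.sorted (h :: t) (fun v => v) false) 0).getD 0
    = t.foldl min h := by
  rcases heq : PySem.List.sorted (h :: t) (fun v => v) false with _ | ⟨m, rest⟩
  · exact absurd heq (by simp [PySem.List.sorted_eq_nil_iff])
  · have hperm := PySem.List.sorted_perm (h :: t) (fun v => v) false
    rw [heq] at hperm
    have hm_mem : m ∈ h :: t := hperm.mem_iff.1 List.mem_cons_self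
    have hle_all := PySem.List.key_head_sorted_le (xs := h :: t) (key := fun v => v) heq
    obtain ⟨hfa, hft⟩ := foldl_min_le t h
    have h1 : t.foldl min h ≤ m := by
      rcases List.mem_cons.1 hm_mem with rfl | hmm
      · exact hfa
      · exact hft m hmm
    have h2 : m ≤ t.foldl min h := by
      rcases foldl_min_mem t h with heq2 | hmem2
      · rw [heq2]; exact hle_all h List.mem_cons_self
      · exact hle_all _ (List.mem_cons_of_mem _ hmem2)
    simp [PySem.List.pyGet?, PySem.List.pyIdx?, le_antisymm h1 h2]

-- ===== VERDICT (by name: the statement is the Claim_ definition above) =====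
theorem minSquare_spec : Claim_equal_minSquare := by
  intro point _ hpre
  obtain ⟨hne, _⟩ := hpre
  obtain ⟨r0, rest, rfl⟩ := List.exists_cons_of_ne_nil hne
  show minSquare (r0 :: rest) = minSquare_alt (r0 :: rest)
  unfold minSquare minSquare_alt
  simp only []
  rw [PySem.List.foldl_pyRange_zero_pyGetD' (r0 :: rest) []
        (fun (s : Int × Int) row =>
          (if s.1 > PySem.List.pyGetD row 0 0 then PySem.List.pyGetD row 0 0 else s.1,
           if s.2 > PySem.List.pyGetD row 1 0 then PySem.List.pyGetD row 1 0 else s.2))]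
  simp only [List.map_cons]
  rw [head_sorted_eq_foldl_min, head_sorted_eq_foldl_min, min_foldl_map, min_foldl_map,
    List.foldl_cons, foldl_pair_min]
  simp [PySem.List.pyGetD, PySem.List.pyGet?, PySem.List.pyIdx?]
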